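-- pv_equiv track=rewrite | github.com/FFKatahiraT/konkurs_triniti_2022 | ex2_prac.py | get_yLineIntensities
-- ===== SOURCE A (Python) =====
-- def get_yLineIntensities(imarray):
-- 	#Takes imarray with depth = 3 (color image)
-- 	#Returns list of vertical lines max intensities
-- 	#Each vertical line max intensity is one element
-- 	#of array YLinesIntensities
-- 	YLinesIntensities = []
-- 	for j in range(1, len(imarray[0])):#y
-- 		maxIntensity = imarray[0][j][0]
-- 		for i in range(len(imarray)):		#x
-- 			if imarray[i][j][0] > maxIntensity:
-- 				maxIntensity = imarray[i][j][0]
-- 		YLinesIntensities.append(int(maxIntensity))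
-- 	return YLinesIntensities
-- ===== SOURCE B (Python) =====
-- def get_yLineIntensities(imarray):
--     W = len(imarray[0])
--
--     def colmax(lo, hi):
--         # per-column maxima (columns 1..W-1) over rows lo..hi-1
--         if hi - lo == 1:
--             return [imarray[lo][j][0] for j in range(1, W)]
--         mid = (lo + hi) // 2
--         left = colmax(lo, mid)
--         right = colmax(mid, hi)
--         return [l if l > r else r for l, r in zip(left, right)]
--
--     return [int(m) for m in colmax(0, len(imarray))]
-- ===== Notes on version B (the rewrite author's own statement) =====
-- stated objective: alternative
-- what changed: A computes each column's maximum with a nested column-by-column scan over all rows; B uses divide-and-conquer on the rows: it recursively computes the per-column maxima vector of each half of the rows and merges the two vectors by pairwise maximum.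
import Mathlib
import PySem

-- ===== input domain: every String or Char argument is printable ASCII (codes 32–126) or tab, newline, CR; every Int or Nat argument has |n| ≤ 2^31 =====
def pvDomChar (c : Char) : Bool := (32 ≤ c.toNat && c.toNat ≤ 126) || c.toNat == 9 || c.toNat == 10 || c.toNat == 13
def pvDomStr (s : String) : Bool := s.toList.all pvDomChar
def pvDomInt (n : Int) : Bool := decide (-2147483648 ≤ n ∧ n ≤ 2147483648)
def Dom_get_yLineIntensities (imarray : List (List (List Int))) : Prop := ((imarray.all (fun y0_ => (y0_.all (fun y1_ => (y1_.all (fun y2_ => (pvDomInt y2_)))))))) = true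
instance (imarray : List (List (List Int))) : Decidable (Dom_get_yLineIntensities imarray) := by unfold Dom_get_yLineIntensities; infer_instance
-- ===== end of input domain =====

-- B replaces A's nested column-by-column/row scan with divide-and-conquer on the rows,
-- merging per-column maxima vectors pairwise (objective: alternative algorithm, same cost).

-- ===== PORT A =====
def get_yLineIntensities (imarray : List (List (List Int))) : List Int :=
  (PySem.List.pyRange 1 (PySem.List.len (PySem.List.pyGetD imarray 0 [])) 1).foldl
    (fun acc j =>
      let m0 := PySem.List.pyGetD (PySem.List.pyGetD (PySem.List.pyGetD imarray 0 []) j []) 0 0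
      let m := (PySem.List.pyRange 0 (PySem.List.len imarray) 1).foldl
        (fun mI i =>
          if PySem.List.pyGetD (PySem.List.pyGetD (PySem.List.pyGetD imarray i []) j []) 0 0 > mI
          then PySem.List.pyGetD (PySem.List.pyGetD (PySem.List.pyGetD imarray i []) j []) 0 0
          else mI) m0
      acc ++ [m]) []

-- ===== PORT B =====
-- Source B's recursive helper colmax(lo, hi). The extra 'fuel' argument only makes the
-- same recursion structurally total: fuel = hi - lo at the top call, and every
-- recursive call strictly shrinks the interval, so fuel never runs out on the
-- calls Python makes (lo < hi).
def pvColmax (im : List (List (List Int))) (W : Int) : Nat → Nat → Nat → List Int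
  | 0, _, _ => []
  | fuel + 1, lo, hi =>
    if hi ≤ lo + 1 then
      (PySem.List.pyRange 1 W 1).map (fun j =>
        PySem.List.pyGetD (PySem.List.pyGetD (PySem.List.pyGetD im (lo : Int) []) j []) 0 0)
    else
      let mid := (lo + hi) / 2
      let left := pvColmax im W fuel lo mid
      let right := pvColmax im W fuel mid hi
      List.zipWith (fun l r => if l > r then l else r) left right

def get_yLineIntensities_alt (imarray : List (List (List Int))) : List Int :=
  let W : Int := PySem.List.len (PySem.List.pyGetD imarray 0 [])
  (pvColmax imarray W imarray.length 0 imarray.length).map (fun m => m)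

-- ===== PRECONDITION & SPEC =====
-- Pre_ is exactly where Python A returns: imarray nonempty (else imarray[0] raises IndexError),
-- and when there are columns to scan (W > 1), every row reaches width W and every scanned pixel
-- imarray[i][j] (1 ≤ j < W) is nonempty (else IndexError on [j] or [0]).
def Pre_get_yLineIntensities (imarray : List (List (List Int))) : Prop :=
  imarray ≠ [] ∧ (1 < (imarray.headD []).length →
    ∀ row ∈ imarray, (imarray.headD []).length ≤ row.length ∧
      ∀ p ∈ (row.take (imarray.headD []).length).drop 1, p ≠ [])
instance (imarray : List (List (List Int))) : Decidable (Pre_get_yLineIntensities imarray) := by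
  unfold Pre_get_yLineIntensities; infer_instance

def pvWitness_get_yLineIntensities : List (List (List Int)) := [[[1], [2]], [[3], [4]]]

def Spec_get_yLineIntensities (imarray : List (List (List Int))) (out : List Int) : Prop := out = get_yLineIntensities_alt imarray
instance (imarray : List (List (List Int))) (out : List Int) : Decidable (Spec_get_yLineIntensities imarray out) := by unfold Spec_get_yLineIntensities; infer_instance

-- ===== CLAIM (what is proved, stated in full; the proofs are below) =====
def Claim_equal_get_yLineIntensities : Prop := ∀ (imarray : List (List (List Int))), Dom_get_yLineIntensities imarray → Pre_get_yLineIntensities imarray → Spec_get_yLineIntensities imarray (get_yLineIntensities imarray)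

-- ===== LEMMAS AND PROOFS =====
def pvValAt (row : List (List Int)) (j : Int) : Int :=
  PySem.List.pyGetD (PySem.List.pyGetD row j []) 0 0

-- max of a nonempty list (0 is never used inside the proofs)
def pvNmax : List Int → Int
  | [] => 0
  | x :: xs => xs.foldl max x

theorem pv_foldl_max_max (a : Int) (l : List Int) :
    ∀ b : Int, l.foldl max (max a b) = max a (l.foldl max b) := by
  induction l with
  | nil => intro b; rfl
  | cons z zs ih =>
      intro b
      simp only [List.foldl_cons, max_assoc]
      exact ih (max b z)

theorem pvNmax_append (a b : List Int) (ha : a ≠ []) (hb : b ≠ []) :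
    pvNmax (a ++ b) = max (pvNmax a) (pvNmax b) := by
  obtain ⟨x, xs, rfl⟩ := List.exists_cons_of_ne_nil ha
  obtain ⟨y, ys, rfl⟩ := List.exists_cons_of_ne_nil hb
  simp only [pvNmax, List.cons_append, List.foldl_append, List.foldl_cons]
  rw [← pv_foldl_max_max (xs.foldl max x) ys y]

theorem pvStep_eq_max (v m : Int) : (if v > m then v else m) = max v m := by
  simp only [max_def]; split_ifs <;> omega

theorem pv_zipWith_map_same {A B : Type} (g : B → B → B) (f1 f2 : A → B) (l : List A) :
    List.zipWith g (l.map f1) (l.map f2) = l.map (fun x => g (f1 x) (f2 x)) := by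
  induction l with
  | nil => rfl
  | cons x xs ih => simp [ih]

-- B's recursive helper computes, column by column, the max over rows lo..hi-1
theorem pvColmax_char (im : List (List (List Int))) (W : Int) :
    ∀ fuel lo hi, hi - lo ≤ fuel → lo < hi → hi ≤ im.length →
    pvColmax im W fuel lo hi = (PySem.List.pyRange 1 W 1).map (fun j =>
      pvNmax (((im.drop lo).take (hi - lo)).map (fun row => pvValAt row j))) := by
  intro fuel
  induction fuel with
  | zero => intro lo hi hn hlt _; omega
  | succ fuel ih =>
    intro lo hi hn hlt hle
    rw [pvColmax]
    by_cases hbase : hi ≤ lo + 1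
    · have hhi : hi = lo + 1 := by omega
      subst hhi
      rw [if_pos (le_refl _)]
      apply List.map_congr_left
      intro j _
      have hlo : lo < im.length := by omega
      have h1 : lo + 1 - lo = 1 := by omega
      rw [List.drop_eq_getElem_cons hlo, h1, List.take_succ_cons, List.take_zero,
        List.map_cons, List.map_nil]
      simp [pvNmax, pvValAt, PySem.List.pyGetD_natCast, List.getElem?_eq_getElem hlo]
    · rw [if_neg hbase]
      have hmidlt : lo < (lo + hi) / 2 := by omega
      have hmidhi : (lo + hi) / 2 < hi := by omega
      show List.zipWith (fun l r => if l > r then l else r)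
          (pvColmax im W fuel lo ((lo + hi) / 2)) (pvColmax im W fuel ((lo + hi) / 2) hi) = _
      rw [ih lo _ (by omega) hmidlt (by omega),
          ih _ hi (by omega) hmidhi (by omega)]
      set mid := (lo + hi) / 2 with hmid
      rw [pv_zipWith_map_same]
      apply List.map_congr_left
      intro j _
      have hsplit : (im.drop lo).take (hi - lo) =
          (im.drop lo).take (mid - lo) ++ (im.drop mid).take (hi - mid) := by
        have : im.drop mid = (im.drop lo).drop (mid - lo) := by
          rw [List.drop_drop]; congr 1; omega
        rw [this, ← List.take_add]
        congr 1; omega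
      rw [hsplit, List.map_append, pvNmax_append, pvStep_eq_max]
      · simp only [ne_eq, List.map_eq_nil_iff]
        intro h
        have hl := congrArg List.length h
        simp only [List.length_take, List.length_drop, List.length_nil] at hl
        omega
      · simp only [ne_eq, List.map_eq_nil_iff]
        intro h
        have hl := congrArg List.length h
        simp only [List.length_take, List.length_drop, List.length_nil] at hl
        omega

-- A's column value: the fold with strict '>' over all rows, seeded with row 0's value,
-- is the max of the whole (nonempty) column
theorem pvA_col (r0 : List (List Int)) (rest : List (List (List Int))) (j : Int) :
    (r0 :: rest).foldl (fun m row => if pvValAt row j > m then pvValAt row j else m)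
      (pvValAt r0 j) = pvNmax ((r0 :: rest).map (fun row => pvValAt row j)) := by
  simp only [pvStep_eq_max, List.foldl_cons, max_self, pvNmax, List.map_cons]
  rw [List.foldl_map]
  have flip : ∀ (l : List (List (List Int))) (a : Int),
      l.foldl (fun m row => max (pvValAt row j) m) a =
      l.foldl (fun m row => max m (pvValAt row j)) a := by
    intro l
    induction l with
    | nil => intro a; rfl
    | cons z zs ih => intro a; rw [List.foldl_cons, List.foldl_cons, max_comm, ih]
  exact flip rest (pvValAt r0 j)

-- ===== VERDICT (by name: the statement is the Claim_ definition above) =====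
theorem get_yLineIntensities_spec : Claim_equal_get_yLineIntensities := by
  intro im _ hpre
  unfold Spec_get_yLineIntensities
  obtain ⟨hne, -⟩ := hpre
  obtain ⟨r0, rest, rfl⟩ := List.exists_cons_of_ne_nil hne
  simp only [get_yLineIntensities, get_yLineIntensities_alt, List.map_id',
    PySem.List.pyGetD_zero_cons, PySem.List.len_eq]
  rw [pvColmax_char (r0 :: rest) _ (r0 :: rest).length 0 (r0 :: rest).length (by omega)
    (by simp) (le_refl _)]
  rw [PySem.List.foldl_append_singleton_eq_map]
  simp only [List.nil_append, Nat.sub_zero, List.drop_zero, List.take_length]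
  apply List.map_congr_left
  intro j hj
  rw [PySem.List.foldl_pyRange_zero_pyGetD' (r0 :: rest) ([] : List (List Int))
    (fun m row => if PySem.List.pyGetD (PySem.List.pyGetD row j []) 0 0 > m
      then PySem.List.pyGetD (PySem.List.pyGetD row j []) 0 0 else m)]
  exact pvA_col r0 rest j
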